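-- pv_equiv track=rewrite | github.com/nwthomas/ai-school-qa-tester | app/string_reversal.py | reverse_string_exclude_special
-- ===== SOURCE A (Python) =====
-- def reverse_string_exclude_special(s):
--     letters = [c for c in s if c.isalnum()]
--     reversed_s = []
--     for c in s:
--         if c.isalnum():
--             reversed_s.append(letters.pop())
--         else:
--             reversed_s.append(c)
--     return ''.join(reversed_s)
-- ===== SOURCE B (Python) =====
-- def reverse_string_exclude_special(s):
--     chars = list(s)
--     i, j = 0, len(chars) - 1
--     while i < j:
--         if not chars[i].isalnum():
--             i += 1
--         elif not chars[j].isalnum():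
--             j -= 1
--         else:
--             chars[i], chars[j] = chars[j], chars[i]
--             i += 1
--             j -= 1
--     return ''.join(chars)
-- ===== Notes on version B (the rewrite author's own statement) =====
-- stated objective: alternative
-- what changed: Replaces the filtered-letters stack that A builds and pops from with an in-place two-pointer swap: two cursors converge over one char array, skipping non-alphanumerics and swapping alphanumeric pairs, with no separate filter pass or pop.
import Mathlib
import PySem

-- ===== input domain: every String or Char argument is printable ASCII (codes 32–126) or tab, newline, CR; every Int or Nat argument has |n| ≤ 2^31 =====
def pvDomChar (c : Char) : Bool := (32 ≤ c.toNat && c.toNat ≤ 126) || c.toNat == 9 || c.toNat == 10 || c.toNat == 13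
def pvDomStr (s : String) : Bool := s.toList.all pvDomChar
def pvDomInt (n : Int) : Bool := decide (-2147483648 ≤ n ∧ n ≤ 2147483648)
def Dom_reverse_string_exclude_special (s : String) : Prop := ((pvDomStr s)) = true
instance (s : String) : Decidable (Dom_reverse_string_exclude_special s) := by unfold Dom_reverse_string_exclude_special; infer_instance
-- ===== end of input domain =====

-- B replaces A's filtered-letters stack (built then popped) by an in-place two-pointer
-- swap over one char array; equivalence of the return values is proved on Dom.


-- ===== PORT A =====
-- the for-loop over s with the mutable `letters` stack; letters.pop() = PySem.List.pop?
-- (default index -1). The `none` branch is Python's IndexError on pop from empty: it is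
-- unreachable here because `letters` holds exactly one element per alnum char of s.
def revGoA : List Char → List Char → List Char
  | [], _ => []
  | c :: rest, letters =>
    if PySem.Chars.isalnum c then
      match PySem.List.pop? letters with
      | some (x, letters') => x :: revGoA rest letters'
      | none => []
    else c :: revGoA rest letters

def reverse_string_exclude_special (s : String) : String :=
  let letters := s.toList.filter PySem.Chars.isalnum
  String.mk (revGoA s.toList letters)

-- ===== PORT B =====
-- the while-loop of Source B: two cursors i, j into the char list, swap via List.set.
-- Indices are Nat (Python's j = len-1 is -1 only for the empty string, where the loop
-- never runs — same as Nat's 0 - 1 = 0 here); chars[i]/chars[j] are always in range in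
-- Python, so List.getD's default is unreachable.
def tpGoB (cs : List Char) (i j : Nat) : List Char :=
  if _h : i < j then
    if ¬ PySem.Chars.isalnum (cs.getD i ' ') then
      tpGoB cs (i + 1) j
    else if ¬ PySem.Chars.isalnum (cs.getD j ' ') then
      tpGoB cs i (j - 1)
    else
      tpGoB ((cs.set i (cs.getD j ' ')).set j (cs.getD i ' ')) (i + 1) (j - 1)
  else cs
termination_by j - i
decreasing_by all_goals omega

def reverse_string_exclude_special_alt (s : String) : String :=
  String.mk (tpGoB s.toList 0 (s.toList.length - 1))

-- ===== PRECONDITION & SPEC =====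
def Spec_reverse_string_exclude_special (s : String) (out : String) : Prop := out = reverse_string_exclude_special_alt s
instance (s : String) (out : String) : Decidable (Spec_reverse_string_exclude_special s out) := by unfold Spec_reverse_string_exclude_special; infer_instance

-- ===== CLAIM (what is proved, stated in full; the proofs are below) =====
def Claim_equal_reverse_string_exclude_special : Prop := ∀ (s : String), Dom_reverse_string_exclude_special s → Spec_reverse_string_exclude_special s (reverse_string_exclude_special s)

-- ===== LEMMAS AND PROOFS =====

-- Common characterisation: merge cs L walks cs, taking the next char of L at each
-- alnum position and keeping non-alnum chars in place.
def pvMerge : List Char → List Char → List Char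
  | [], _ => []
  | c :: rest, L =>
    if PySem.Chars.isalnum c then
      match L with
      | x :: L' => x :: pvMerge rest L'
      | [] => []
    else c :: pvMerge rest L

-- A's side: popping from the back of `letters` = consuming letters.reverse from the front.
theorem revGoA_eq_merge (cs L : List Char) : revGoA cs L = pvMerge cs L.reverse := by
  induction cs generalizing L with
  | nil => simp [revGoA, pvMerge]
  | cons c rest ih =>
    by_cases hc : PySem.Chars.isalnum c
    · rcases List.eq_nil_or_concat L with rfl | ⟨L', x, rfl⟩
      · simp [revGoA, pvMerge, hc, PySem.List.pop?]
      · simp [revGoA, pvMerge, hc, PySem.List.pop?_last, ih]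
    · simp [revGoA, pvMerge, hc, ih]

theorem merge_append_not_alnum (d : Char) (hd : ¬ PySem.Chars.isalnum d = true)
    (xs L : List Char) (h : (xs.filter PySem.Chars.isalnum).length = L.length) :
    pvMerge (xs ++ [d]) L = pvMerge xs L ++ [d] := by
  induction xs generalizing L with
  | nil => simp [pvMerge, hd]
  | cons c rest ih =>
    by_cases hc : PySem.Chars.isalnum c
    · cases L with
      | nil => simp [List.filter_cons, hc] at h
      | cons x L' =>
        simp [List.filter_cons, hc] at h
        simp [pvMerge, hc, ih L' h]
    · simp [List.filter_cons, hc] at h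
      simp [pvMerge, hc, ih L h]

theorem merge_append_alnum (d y : Char) (hd : PySem.Chars.isalnum d = true)
    (xs M : List Char) (h : (xs.filter PySem.Chars.isalnum).length = M.length) :
    pvMerge (xs ++ [d]) (M ++ [y]) = pvMerge xs M ++ [y] := by
  induction xs generalizing M with
  | nil =>
    simp at h
    obtain rfl : M = [] := List.eq_nil_of_length_eq_zero h.symm
    simp [pvMerge, hd]
  | cons c rest ih =>
    by_cases hc : PySem.Chars.isalnum c
    · cases M with
      | nil => simp [List.filter_cons, hc] at h
      | cons x M' =>
        simp [List.filter_cons, hc] at h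
        simp [pvMerge, hc, ih M' h]
    · simp [List.filter_cons, hc] at h
      simp [pvMerge, hc, ih M h]

-- The structural two-pointer on a bare list (proof-side mirror of tpGoB's loop body).
def tpl (cs : List Char) : List Char :=
  if _h : cs.length ≤ 1 then cs
  else
    if ¬ PySem.Chars.isalnum (cs.headD ' ') then
      cs.headD ' ' :: tpl cs.tail
    else if ¬ PySem.Chars.isalnum (cs.getLastD ' ') then
      tpl cs.dropLast ++ [cs.getLastD ' ']
    else
      cs.getLastD ' ' :: tpl cs.tail.dropLast ++ [cs.headD ' ']
termination_by cs.length
decreasing_by all_goals (simp_all [List.length_tail, List.length_dropLast]; omega)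

theorem tpl_eq_merge (cs : List Char) :
    tpl cs = pvMerge cs (cs.filter PySem.Chars.isalnum).reverse := by
  by_cases h1 : cs.length ≤ 1
  · match cs, h1 with
    | [], _ => simp [tpl, pvMerge]
    | [c], _ =>
      rw [tpl]
      by_cases hc : PySem.Chars.isalnum c <;>
        simp [pvMerge, List.filter_cons, hc]
  · obtain ⟨c, mid, d, rfl⟩ : ∃ c mid d, cs = c :: (mid ++ [d]) := by
      match cs, h1 with
      | c :: rest, h1 =>
        rcases List.eq_nil_or_concat rest with rfl | ⟨mid, d, hmd⟩
        · simp at h1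
        · exact ⟨c, mid, d, by rw [hmd, List.concat_eq_append]⟩
    have ihm := tpl_eq_merge mid
    have ihcm := tpl_eq_merge (c :: mid)
    have ihmd := tpl_eq_merge (mid ++ [d])
    rw [tpl, dif_neg h1]
    have hhead : (c :: (mid ++ [d])).headD ' ' = c := rfl
    have hlast : (c :: (mid ++ [d])).getLastD ' ' = d := by
      rw [show c :: (mid ++ [d]) = (c :: mid) ++ [d] from rfl, List.getLastD_concat]
    rw [hhead, hlast]
    by_cases hc : PySem.Chars.isalnum c
    · by_cases hd : PySem.Chars.isalnum d
      · -- both ends alnum: swap them, recurse on the middle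
        rw [if_neg (by simp [hc]), if_neg (by simp [hd])]
        have hmid : (c :: (mid ++ [d])).tail.dropLast = mid := by
          rw [List.tail_cons, List.dropLast_concat]
        have hfil : ((c :: (mid ++ [d])).filter PySem.Chars.isalnum).reverse
            = d :: ((mid.filter PySem.Chars.isalnum).reverse ++ [c]) := by
          simp [List.filter_cons, List.filter_append, hc, hd]
        rw [hmid, hfil]
        have hstep : pvMerge (c :: (mid ++ [d])) (d :: ((mid.filter PySem.Chars.isalnum).reverse ++ [c]))
            = d :: pvMerge (mid ++ [d]) ((mid.filter PySem.Chars.isalnum).reverse ++ [c]) := by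
          simp [pvMerge, hc]
        rw [hstep, merge_append_alnum d c hd mid _ (by simp), ihm]
        simp
      · -- last char not alnum: it stays in place, recurse on the rest
        rw [if_neg (by simp [hc]), if_pos (by simp [hd])]
        have hdl : (c :: (mid ++ [d])).dropLast = c :: mid := by
          rw [show c :: (mid ++ [d]) = (c :: mid) ++ [d] from rfl, List.dropLast_concat]
        have hfil : ((c :: mid) ++ [d]).filter PySem.Chars.isalnum
            = (c :: mid).filter PySem.Chars.isalnum := by
          simp [List.filter_cons, List.filter_append, hd]
        rw [hdl, ihcm, show c :: (mid ++ [d]) = (c :: mid) ++ [d] from rfl, hfil]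
        exact (merge_append_not_alnum d (by simp [hd]) (c :: mid) _ (by simp)).symm
    · -- head char not alnum: it stays in place, recurse on the tail
      rw [if_pos (by simp [hc])]
      have hfil : (c :: (mid ++ [d])).filter PySem.Chars.isalnum
          = (mid ++ [d]).filter PySem.Chars.isalnum := by
        simp [List.filter_cons, hc]
      rw [hfil, List.tail_cons, ihmd]
      simp [pvMerge, hc]
termination_by cs.length
decreasing_by all_goals first | omega | (simp; omega) | (simp_all; omega) | simp_all

-- tpGoB leaves everything outside [i, j] in place and applies tpl to the segment.
theorem tpGoB_eq_tpl (cs : List Char) (i j : Nat) (hj : j < cs.length) (hij : i ≤ j + 1) :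
    tpGoB cs i j = cs.take i ++ tpl ((cs.drop i).take (j + 1 - i)) ++ cs.drop (j + 1) := by
  by_cases h : i < j
  · have hi : i < cs.length := by omega
    have hseglen : ((cs.drop i).take (j + 1 - i)).length = j + 1 - i := by
      simp [List.length_take, List.length_drop]; omega
    have hhead : ((cs.drop i).take (j + 1 - i)).headD ' ' = cs.getD i ' ' := by
      have h0 : 0 < ((cs.drop i).take (j + 1 - i)).length := by omega
      rw [show ∀ (l : List Char), l.headD ' ' = l.getD 0 ' ' from fun l => by cases l <;> simp]
      rw [List.getD_eq_getElem _ _ h0, List.getD_eq_getElem _ _ hi]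
      simp [List.getElem_take, List.getElem_drop]
    have hlastd : ((cs.drop i).take (j + 1 - i)).getLastD ' ' = cs.getD j ' ' := by
      rw [List.getLastD_eq_getLast?, List.getLast?_eq_getElem?,
        List.getElem?_eq_getElem (by omega), List.getD_eq_getElem _ _ hj]
      simp [hseglen, List.getElem_take, List.getElem_drop]
      congr 1; omega
    have hlen2 : ¬ ((cs.drop i).take (j + 1 - i)).length ≤ 1 := by omega
    rw [tpGoB, dif_pos h]
    by_cases ha : PySem.Chars.isalnum (cs.getD i ' ')
    · by_cases hb : PySem.Chars.isalnum (cs.getD j ' ')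
      · -- swap case
        rw [if_neg (not_not_intro ha), if_neg (not_not_intro hb)]
        set cs' := (cs.set i (cs.getD j ' ')).set j (cs.getD i ' ') with hcs'
        have hlen' : cs'.length = cs.length := by simp [hcs']
        have ih := tpGoB_eq_tpl cs' (i + 1) (j - 1) (by omega) (by omega)
        rw [ih]
        have e1 : cs'.take (i + 1) = cs.take i ++ [cs.getD j ' '] := by
          apply List.ext_getElem
          · simp [hcs']; omega
          · intro n h1 h2
            simp only [hcs', List.getElem_take, List.getElem_set]
            simp only [List.length_take] at h1
            rcases Nat.lt_or_ge n i with hn | hn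
            · rw [if_neg (by omega), if_neg (by omega),
                List.getElem_append_left (by simp only [List.length_take]; omega)]
              simp [List.getElem_take]
            · have : n = i := by omega
              subst this
              rw [if_neg (by omega), if_pos rfl,
                List.getElem_append_right (by simp only [List.length_take]; omega)]
              simp [List.getD_eq_getElem _ _ hj]
        have e2 : cs'.drop ((j - 1) + 1) = cs.getD i ' ' :: cs.drop (j + 1) := by
          have hj' : (j - 1) + 1 = j := by omega
          rw [hj', List.drop_eq_getElem_cons (by omega)]
          congr 1
          · simp [hcs', List.getElem_set, List.getD_eq_getElem _ _ hi]
          · apply List.ext_getElem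
            · simp [hcs']
            · intro n h1 h2
              simp only [hcs', List.getElem_drop, List.getElem_set]
              rw [if_neg (by omega), if_neg (by omega)]
        have e3 : (cs'.drop (i + 1)).take ((j - 1) + 1 - (i + 1))
            = ((cs.drop i).take (j + 1 - i)).tail.dropLast := by
          apply List.ext_getElem
          · simp [hcs', List.length_take, List.length_drop, List.length_tail,
              List.length_dropLast]
            omega
          · intro n h1 h2
            simp only [List.getElem_dropLast, List.getElem_tail, List.getElem_take,
              List.getElem_drop, hcs', List.getElem_set]
            rw [if_neg (by simp [List.length_take, List.length_drop] at h1; omega),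
              if_neg (by simp [List.length_take, List.length_drop] at h1; omega)]
            congr 1
            omega
        rw [e1, e2, e3]
        conv_rhs => rw [tpl, dif_neg hlen2, hhead, hlastd,
          if_neg (not_not_intro ha), if_neg (not_not_intro hb)]
        simp
      · -- right char not alnum: j moves left
        rw [if_neg (not_not_intro ha), if_pos hb]
        have ih := tpGoB_eq_tpl cs i (j - 1) (by omega) (by omega)
        rw [ih]
        have e4 : (cs.drop i).take ((j - 1) + 1 - i)
            = ((cs.drop i).take (j + 1 - i)).dropLast := by
          apply List.ext_getElem
          · simp [List.length_take, List.length_drop, List.length_dropLast]; omega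
          · intro n h1 h2
            simp [List.getElem_dropLast, List.getElem_take, List.getElem_drop]
        have e5 : cs.drop ((j - 1) + 1) = cs.getD j ' ' :: cs.drop (j + 1) := by
          have hj' : (j - 1) + 1 = j := by omega
          rw [hj', List.drop_eq_getElem_cons hj, List.getD_eq_getElem _ _ hj]
        rw [e4, e5]
        conv_rhs => rw [tpl, dif_neg hlen2, hhead, hlastd,
          if_neg (not_not_intro ha), if_pos hb]
        simp
    · -- left char not alnum: i moves right
      rw [if_pos ha]
      have ih := tpGoB_eq_tpl cs (i + 1) j (by omega) (by omega)
      rw [ih]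
      have e6 : cs.take (i + 1) = cs.take i ++ [cs.getD i ' '] := by
        rw [List.take_succ, List.getElem?_eq_getElem hi, List.getD_eq_getElem _ _ hi]
        rfl
      have e7 : (cs.drop (i + 1)).take (j + 1 - (i + 1))
          = ((cs.drop i).take (j + 1 - i)).tail := by
        apply List.ext_getElem
        · simp [List.length_take, List.length_drop, List.length_tail]; omega
        · intro n h1 h2
          simp only [List.getElem_tail, List.getElem_take, List.getElem_drop]
          congr 1; omega
      rw [e6, e7]
      conv_rhs => rw [tpl, dif_neg hlen2, hhead, if_pos ha]
      simp
  · -- loop not entered: the segment has at most one element, tpl keeps it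
    rw [tpGoB, dif_neg h]
    have htpl : tpl ((cs.drop i).take (j + 1 - i)) = (cs.drop i).take (j + 1 - i) := by
      rw [tpl, dif_pos (by simp [List.length_take]; omega)]
    have hdd : cs.drop (j + 1) = (cs.drop i).drop (j + 1 - i) := by
      rw [List.drop_drop]; congr 1; omega
    rw [htpl, hdd, List.append_assoc, List.take_append_drop, List.take_append_drop]
termination_by j - i
decreasing_by all_goals omega

theorem alt_eq_merge (s : String) :
    reverse_string_exclude_special_alt s
      = String.mk (pvMerge s.toList (s.toList.filter PySem.Chars.isalnum).reverse) := by
  unfold reverse_string_exclude_special_alt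
  rcases List.eq_nil_or_concat s.toList with hnil | ⟨xs, x, hx⟩
  · rw [hnil, tpGoB]
    simp [pvMerge]
  · have hlen : 0 < s.toList.length := by rw [hx]; simp
    rw [tpGoB_eq_tpl s.toList 0 (s.toList.length - 1) (by omega) (by omega)]
    have h1 : s.toList.length - 1 + 1 - 0 = s.toList.length := by omega
    have h2 : s.toList.length - 1 + 1 = s.toList.length := by omega
    rw [h1, h2, List.drop_zero, List.take_zero, List.take_length, List.drop_length,
      tpl_eq_merge]
    simp

-- ===== VERDICT (by name: the statement is the Claim_ definition above) =====
theorem reverse_string_exclude_special_spec : Claim_equal_reverse_string_exclude_special := by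
  intro s _
  show reverse_string_exclude_special s = reverse_string_exclude_special_alt s
  rw [alt_eq_merge]
  show String.mk (revGoA s.toList (s.toList.filter PySem.Chars.isalnum)) = _
  rw [revGoA_eq_merge]
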